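-- pv_equiv track=rewrite | github.com/Youri-Halmaert/Project-EULER | problem26.py | trouver_cycle
-- ===== SOURCE A (Python) =====
-- def trouver_cycle(n):
--     seen = {}
--     value = 1
--     position = 0
--
--     while True:
--         if value == 0:
--             return 0  # Terminating decimal, no cycle
--         if value in seen:
--             return position - seen[value]  # Length of the cycle
--         seen[value] = position
--         value = (value * 10) % n
--         position += 1
-- ===== SOURCE B (Python) =====
-- def trouver_cycle(n):
--     # Floyd's tortoise-and-hare cycle detection on v -> (v*10) % n:
--     # no dictionary, O(1) extra space.
--     tort = (1 * 10) % n
--     hare = (tort * 10) % n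
--     while tort != hare:
--         tort = (tort * 10) % n
--         hare = ((hare * 10) % n * 10) % n
--     if tort == 0:
--         return 0  # Terminating decimal, no cycle
--     lam = 1
--     r = (tort * 10) % n
--     while r != tort:
--         r = (r * 10) % n
--         lam += 1
--     return lam
-- ===== Notes on version B (the rewrite author's own statement) =====
-- stated objective: alternative
-- what changed: Replaces the position dictionary (O(cycle) extra space, hashing every step) with Floyd's tortoise-and-hare cycle detection followed by a direct cycle-length count, using O(1) space and no dictionary.
import Mathlib
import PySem

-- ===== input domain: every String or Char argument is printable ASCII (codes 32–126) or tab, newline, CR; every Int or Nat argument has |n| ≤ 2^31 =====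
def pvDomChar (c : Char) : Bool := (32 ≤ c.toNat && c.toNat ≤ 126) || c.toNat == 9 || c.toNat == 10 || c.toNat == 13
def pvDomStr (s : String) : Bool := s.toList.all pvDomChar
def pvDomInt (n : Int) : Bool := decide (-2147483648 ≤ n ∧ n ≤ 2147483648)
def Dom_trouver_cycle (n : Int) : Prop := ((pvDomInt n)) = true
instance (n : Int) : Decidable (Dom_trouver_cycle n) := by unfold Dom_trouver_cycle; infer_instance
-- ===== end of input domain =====

-- B replaces A's position dictionary with Floyd's tortoise-and-hare cycle detection
-- plus a direct cycle-length count: same values, no dictionary, O(1) extra space.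

-- ===== PORT A =====
-- A's while-loop as fuel recursion; fuel n.natAbs + 2 is proved sufficient (the loop
-- exits after at most |n|+1 steps by pigeonhole), so the 0-fuel branch is unreachable.
def trouver_cycleGo (n : Int) (seen : PySem.Dict Int Int) (value : Int) (position : Int) :
    Nat → Int
  | 0 => 0
  | fuel + 1 =>
    if value = 0 then 0
    else
      match seen.get? value with
      | some p => position - p
      | none =>
        trouver_cycleGo n (seen.insert value position) (PySem.Int.mod (value * 10) n)
          (position + 1) fuel

def trouver_cycle (n : Int) : Int :=
  trouver_cycleGo n PySem.Dict.empty 1 0 (n.natAbs + 2)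

-- ===== PORT B =====
-- while tort != hare: tort one step, hare two steps
def floydMeetGo (n : Int) (tort hare : Int) : Nat → Int
  | 0 => 0
  | fuel + 1 =>
    if tort = hare then tort
    else
      floydMeetGo n (PySem.Int.mod (tort * 10) n)
        (PySem.Int.mod (PySem.Int.mod (hare * 10) n * 10) n) fuel

-- while r != tort: r one step, lam += 1
def cycleLenGo (n : Int) (tort r lam : Int) : Nat → Int
  | 0 => 0
  | fuel + 1 =>
    if r = tort then lam
    else cycleLenGo n tort (PySem.Int.mod (r * 10) n) (lam + 1) fuel

def trouver_cycle_alt (n : Int) : Int :=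
  let tort := PySem.Int.mod (1 * 10) n
  let hare := PySem.Int.mod (tort * 10) n
  let m := floydMeetGo n tort hare (n.natAbs + 2)
  if m = 0 then 0
  else cycleLenGo n m (PySem.Int.mod (m * 10) n) 1 (n.natAbs + 2)

-- ===== PRECONDITION & SPEC =====
-- Pre_ excludes exactly n = 0, where A raises ZeroDivisionError (as does B).
def Pre_trouver_cycle (n : Int) : Prop := n ≠ 0
instance (n : Int) : Decidable (Pre_trouver_cycle n) := by unfold Pre_trouver_cycle; infer_instance

def pvWitness_trouver_cycle : Int := 7

def Spec_trouver_cycle (n : Int) (out : Int) : Prop := out = trouver_cycle_alt n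
instance (n : Int) (out : Int) : Decidable (Spec_trouver_cycle n out) := by
  unfold Spec_trouver_cycle; infer_instance

-- ===== CLAIM (what is proved, stated in full; the proofs are below) =====
def Claim_equal_trouver_cycle : Prop :=
  ∀ (n : Int), Dom_trouver_cycle n → Pre_trouver_cycle n →
    Spec_trouver_cycle n (trouver_cycle n)

-- ===== LEMMAS AND PROOFS =====

-- The orbit 1, 10 % n, 100 % n, … both loops walk.
def pvOrb (n : Int) : Nat → Int
  | 0 => 1
  | i + 1 => PySem.Int.mod (pvOrb n i * 10) n

lemma pvOrb_succ (n : Int) (i : Nat) : pvOrb n (i + 1) = PySem.Int.mod (pvOrb n i * 10) n := rfl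

lemma pvOrbRange (n : Int) (hn : n ≠ 0) (i : Nat) :
    min (n + 1) 0 ≤ pvOrb n i ∧ pvOrb n i ≤ max n 1 := by
  induction i with
  | zero => simp only [pvOrb]; omega
  | succ m _ =>
    rcases lt_or_gt_of_ne hn with hneg | hpos
    · have h := PySem.Int.mod_neg_bounds (a := pvOrb n m * 10) hneg
      rw [pvOrb_succ]; omega
    · have h1 := PySem.Int.mod_nonneg (a := pvOrb n m * 10) hpos
      have h2 := PySem.Int.mod_lt (a := pvOrb n m * 10) hpos
      rw [pvOrb_succ]; omega

-- pigeonhole size bound: pairwise-distinct orbit prefixes have length ≤ |n| + 1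
lemma pvOrbCard (n : Int) (hn : n ≠ 0) (L : Nat)
    (hd : ∀ i j, i < j → j < L → pvOrb n i ≠ pvOrb n j) : L ≤ n.natAbs + 1 := by
  have key := Finset.card_le_card_of_injOn
    (f := fun i => (pvOrb n i - min (n + 1) 0).toNat)
    (s := Finset.range L) (t := Finset.range (n.natAbs + 1)) ?_ ?_
  · simpa using key
  · intro i _
    have h := pvOrbRange n hn i
    simp only [Finset.coe_range, Set.mem_Iio]
    rcases lt_or_gt_of_ne hn with hneg | hpos
    · rw [min_eq_left (by omega : n + 1 ≤ (0:Int)), max_eq_right (by omega : n ≤ (1:Int))] at h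
      rw [min_eq_left (by omega : n + 1 ≤ (0:Int))]
      omega
    · rw [min_eq_right (by omega : (0:Int) ≤ n + 1), max_eq_left (by omega : (1:Int) ≤ n)] at h
      rw [min_eq_right (by omega : (0:Int) ≤ n + 1)]
      omega
  · intro i hi j hj hf
    simp only [Finset.coe_range, Set.mem_Iio] at hi hj
    have hi' := pvOrbRange n hn i
    have hj' := pvOrbRange n hn j
    simp only at hf
    have he : pvOrb n i = pvOrb n j := by
      rcases lt_or_gt_of_ne hn with hneg | hpos
      · rw [min_eq_left (by omega : n + 1 ≤ (0:Int))] at hi' hj' hf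
        omega
      · rw [min_eq_right (by omega : (0:Int) ≤ n + 1)] at hi' hj' hf
        omega
    rcases lt_trichotomy i j with h | h | h
    · exact absurd he (hd i j h hj)
    · exact h
    · exact absurd he.symm (hd j i h hi)

lemma pvExRepeat (n : Int) (hn : n ≠ 0) :
    ∃ i p, 1 ≤ p ∧ pvOrb n (i + p) = pvOrb n i := by
  by_contra h
  push_neg at h
  have hd : ∀ i j, i < j → j < n.natAbs + 2 → pvOrb n i ≠ pvOrb n j := by
    intro i j hij _ he
    exact h i (j - i) (by omega) (by rw [show i + (j - i) = j from by omega]; exact he.symm)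
  have := pvOrbCard n hn (n.natAbs + 2) hd
  omega

-- a repeat propagates forward
lemma pvShift (n : Int) (a p : Nat) (h : pvOrb n (a + p) = pvOrb n a) :
    ∀ d, pvOrb n (a + d + p) = pvOrb n (a + d) := by
  intro d
  induction d with
  | zero => simpa using h
  | succ m ih =>
    have e1 : a + (m + 1) + p = (a + m + p) + 1 := by omega
    rw [e1, pvOrb_succ, ih, show a + (m + 1) = (a + m) + 1 from rfl, pvOrb_succ]

lemma pvShiftGe (n : Int) (a p : Nat) (h : pvOrb n (a + p) = pvOrb n a)
    (i : Nat) (hai : a ≤ i) : pvOrb n (i + p) = pvOrb n i := by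
  obtain ⟨d, rfl⟩ : ∃ d, i = a + d := ⟨i - a, by omega⟩
  exact pvShift n a p h d

lemma pvPmul (n : Int) (t c : Nat)
    (hper : ∀ i, t ≤ i → pvOrb n (i + c) = pvOrb n i) :
    ∀ N i, t ≤ i → pvOrb n (i + N * c) = pvOrb n i := by
  intro N
  induction N with
  | zero => simp
  | succ m ih =>
    intro i hi
    have e : i + (m + 1) * c = (i + m * c) + c := by ring
    rw [e, hper _ (by omega), ih i hi]

-- any repeat at an index ≥ t has period ≥ c
lemma pvBack (n : Int) (t c : Nat) (hc1 : 1 ≤ c)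
    (hper : ∀ i, t ≤ i → pvOrb n (i + c) = pvOrb n i)
    (hcmin : ∀ p, 1 ≤ p → pvOrb n (t + p) = pvOrb n t → c ≤ p)
    (i p : Nat) (hti : t ≤ i) (hp1 : 1 ≤ p)
    (hrep : pvOrb n (i + p) = pvOrb n i) : c ≤ p := by
  have hij : i ≤ t + i * c := by
    have := Nat.le_mul_of_pos_right i (show 0 < c by omega)
    omega
  have h1 : pvOrb n (t + i * c) = pvOrb n t := pvPmul n t c hper i t le_rfl
  have h2 : pvOrb n (t + i * c + p) = pvOrb n (t + i * c) := pvShiftGe n i p hrep _ hij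
  have h3 : pvOrb n ((t + p) + i * c) = pvOrb n (t + p) := pvPmul n t c hper i (t + p) (by omega)
  have e : t + i * c + p = (t + p) + i * c := by omega
  apply hcmin p hp1
  rw [← h3, ← e, h2, h1]

lemma pvDist (n : Int) (t c : Nat) (hc1 : 1 ≤ c)
    (hper : ∀ i, t ≤ i → pvOrb n (i + c) = pvOrb n i)
    (hcmin : ∀ p, 1 ≤ p → pvOrb n (t + p) = pvOrb n t → c ≤ p)
    (hmin : ∀ i p, 1 ≤ p → pvOrb n (i + p) = pvOrb n i → t ≤ i) :
    ∀ i j, i < j → j < t + c → pvOrb n i ≠ pvOrb n j := by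
  intro i j hij hj he
  have hrep : pvOrb n (i + (j - i)) = pvOrb n i := by
    rw [show i + (j - i) = j from by omega]; exact he.symm
  have hti := hmin i (j - i) (by omega) hrep
  have := pvBack n t c hc1 hper hcmin i (j - i) hti (by omega) hrep
  omega

lemma pvZeroStep (n : Int) (i : Nat) (h : pvOrb n i = 0) : pvOrb n (i + 1) = 0 := by
  rw [pvOrb_succ, h]
  norm_num
  rw [PySem.Int.mod_eq_zero_iff_dvd]
  exact dvd_zero n

lemma pvZeroGe (n : Int) (a : Nat) (h : pvOrb n a = 0) :
    ∀ i, a ≤ i → pvOrb n i = 0 := by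
  intro i hai
  obtain ⟨d, rfl⟩ : ∃ d, i = a + d := ⟨i - a, by omega⟩
  clear hai
  induction d with
  | zero => exact h
  | succ m ih => exact pvZeroStep n (a + m) ih

-- A's loop, no zero in the orbit: exits at step t + c returning c
lemma pvAloopNZ (n : Int) (t c : Nat) (hc1 : 1 ≤ c)
    (hrepc : pvOrb n (t + c) = pvOrb n t)
    (hdist : ∀ i j, i < j → j < t + c → pvOrb n i ≠ pvOrb n j)
    (hnz : ∀ i, pvOrb n i ≠ 0) :
    ∀ (fuel j : Nat) (seen : PySem.Dict Int Int), j ≤ t + c → t + c - j < fuel →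
      (∀ i, i < j → seen.get? (pvOrb n i) = some (i : Int)) →
      (∀ x p, seen.get? x = some p → ∃ i, i < j ∧ pvOrb n i = x) →
      trouver_cycleGo n seen (pvOrb n j) (j : Int) fuel = (c : Int) := by
  intro fuel
  induction fuel with
  | zero => intro j seen hj hf _ _; omega
  | succ f ih =>
    intro j seen hj hf inv1 inv2
    rw [trouver_cycleGo, if_neg (hnz j)]
    by_cases hjt : j = t + c
    · subst hjt
      rw [hrepc, inv1 t (by omega)]
      push_cast
      ring
    · have hjlt : j < t + c := by omega
      have hnone : seen.get? (pvOrb n j) = none := by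
        cases hg : seen.get? (pvOrb n j) with
        | none => rfl
        | some p =>
          obtain ⟨i, hi, he⟩ := inv2 _ _ hg
          exact absurd he (hdist i j hi hjlt)
      rw [hnone]
      have e1 : PySem.Int.mod (pvOrb n j * 10) n = pvOrb n (j + 1) := rfl
      have e2 : (j : Int) + 1 = ((j + 1 : Nat) : Int) := by push_cast; ring
      rw [e1, e2]
      apply ih (j + 1) _ (by omega) (by omega)
      · intro i hi
        rcases Nat.lt_succ_iff_lt_or_eq.mp hi with hlt | rfl
        · rw [PySem.Dict.get?_insert_of_ne _ _ (hdist i j hlt hjlt)]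
          exact inv1 i hlt
        · exact PySem.Dict.get?_insert_self _ _ _
      · intro x p hx
        rw [PySem.Dict.get?_insert] at hx
        split at hx
        · exact ⟨j, by omega, by omega⟩
        · obtain ⟨i, hi, he⟩ := inv2 _ _ hx
          exact ⟨i, by omega, he⟩

-- A's loop, zero in the orbit (first zero at t): exits at step t returning 0
lemma pvAloopZ (n : Int) (t : Nat)
    (hzt : pvOrb n t = 0)
    (hmin0 : ∀ i, i < t → pvOrb n i ≠ 0)
    (hdist : ∀ i j, i < j → j ≤ t → pvOrb n i ≠ pvOrb n j) :
    ∀ (fuel j : Nat) (seen : PySem.Dict Int Int), j ≤ t → t - j < fuel →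
      (∀ x p, seen.get? x = some p → ∃ i, i < j ∧ pvOrb n i = x) →
      trouver_cycleGo n seen (pvOrb n j) (j : Int) fuel = 0 := by
  intro fuel
  induction fuel with
  | zero => intro j seen hj hf _; omega
  | succ f ih =>
    intro j seen hj hf inv2
    by_cases hjt : j = t
    · subst hjt
      rw [trouver_cycleGo, if_pos hzt]
    · have hjlt : j < t := by omega
      rw [trouver_cycleGo, if_neg (hmin0 j hjlt)]
      have hnone : seen.get? (pvOrb n j) = none := by
        cases hg : seen.get? (pvOrb n j) with
        | none => rfl
        | some p =>
          obtain ⟨i, hi, he⟩ := inv2 _ _ hg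
          exact absurd he (hdist i j hi (by omega))
      rw [hnone]
      have e1 : PySem.Int.mod (pvOrb n j * 10) n = pvOrb n (j + 1) := rfl
      have e2 : (j : Int) + 1 = ((j + 1 : Nat) : Int) := by push_cast; ring
      rw [e1, e2]
      apply ih (j + 1) _ (by omega) (by omega)
      intro x p hx
      rw [PySem.Dict.get?_insert] at hx
      split at hx
      · exact ⟨j, by omega, by omega⟩
      · obtain ⟨i, hi, he⟩ := inv2 _ _ hx
        exact ⟨i, by omega, he⟩

-- B's first loop reaches the least k ≥ 1 with orb (2k) = orb k
lemma pvMeet (n : Int) (K : Nat) (hKrep : pvOrb n (2 * K) = pvOrb n K)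
    (hKmin : ∀ k, 1 ≤ k → pvOrb n (2 * k) = pvOrb n k → K ≤ k) :
    ∀ (fuel s : Nat), 1 ≤ s → s ≤ K → K - s < fuel →
      floydMeetGo n (pvOrb n s) (pvOrb n (2 * s)) fuel = pvOrb n K := by
  intro fuel
  induction fuel with
  | zero => intro s _ _ hf; omega
  | succ f ih =>
    intro s hs1 hsK hf
    rw [floydMeetGo]
    by_cases he : pvOrb n s = pvOrb n (2 * s)
    · rw [if_pos he]
      have h1 : K ≤ s := hKmin s hs1 he.symm
      have : s = K := by omega
      rw [this]
    · rw [if_neg he]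
      have hne : s ≠ K := fun h => he (by rw [h]; exact hKrep.symm)
      have e1 : PySem.Int.mod (pvOrb n s * 10) n = pvOrb n (s + 1) := rfl
      have e2 : PySem.Int.mod (PySem.Int.mod (pvOrb n (2 * s) * 10) n * 10) n
          = pvOrb n (2 * (s + 1)) := by
        rw [show 2 * (s + 1) = (2 * s + 1) + 1 from by ring]
        rfl
      rw [e1, e2]
      exact ih (s + 1) (by omega) (by omega) (by omega)

-- B's second loop counts the minimal period c of the meeting point
lemma pvLam (n : Int) (c K : Nat) (hc1 : 1 ≤ c)
    (hKper : pvOrb n (K + c) = pvOrb n K)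
    (hback : ∀ p, 1 ≤ p → pvOrb n (K + p) = pvOrb n K → c ≤ p) :
    ∀ (fuel j : Nat), 1 ≤ j → j ≤ c → c - j < fuel →
      cycleLenGo n (pvOrb n K) (pvOrb n (K + j)) (j : Int) fuel = (c : Int) := by
  intro fuel
  induction fuel with
  | zero => intro j _ _ hf; omega
  | succ f ih =>
    intro j hj1 hjc hf
    rw [cycleLenGo]
    by_cases he : pvOrb n (K + j) = pvOrb n K
    · rw [if_pos he]
      have := hback j hj1 he
      have : j = c := by omega
      rw [this]
    · rw [if_neg he]
      have hne : j ≠ c := fun h => he (h ▸ hKper)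
      have e1 : PySem.Int.mod (pvOrb n (K + j) * 10) n = pvOrb n (K + (j + 1)) := rfl
      have e2 : (j : Int) + 1 = ((j + 1 : Nat) : Int) := by push_cast; ring
      rw [e1, e2]
      exact ih (j + 1) (by omega) (by omega) (by omega)

lemma pvMain (n : Int) (hn : n ≠ 0) : trouver_cycle n = trouver_cycle_alt n := by
  classical
  obtain ⟨i0, p0, hp0, hrep0⟩ := pvExRepeat n hn
  have hPex : ∃ i, ∃ p, 1 ≤ p ∧ pvOrb n (i + p) = pvOrb n i := ⟨i0, p0, hp0, hrep0⟩
  have hPspec := Nat.find_spec hPex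
  set t := Nat.find hPex with ht
  obtain ⟨c0, hc0, hrepc0⟩ := hPspec
  have hmin : ∀ i p, 1 ≤ p → pvOrb n (i + p) = pvOrb n i → t ≤ i :=
    fun i p hp hr => Nat.find_min' hPex ⟨p, hp, hr⟩
  have hQex : ∃ p, 1 ≤ p ∧ pvOrb n (t + p) = pvOrb n t := ⟨c0, hc0, hrepc0⟩
  have hQspec := Nat.find_spec hQex
  set c := Nat.find hQex with hc
  obtain ⟨hc1, hrepc⟩ := hQspec
  have hcmin : ∀ p, 1 ≤ p → pvOrb n (t + p) = pvOrb n t → c ≤ p :=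
    fun p hp hr => Nat.find_min' hQex ⟨hp, hr⟩
  have hper : ∀ i, t ≤ i → pvOrb n (i + c) = pvOrb n i :=
    fun i hi => pvShiftGe n t c hrepc i hi
  have hdist := pvDist n t c hc1 hper hcmin hmin
  have htc : t + c ≤ n.natAbs + 1 := pvOrbCard n hn (t + c) hdist
  -- the meeting index K
  have hk0t : t ≤ (t / c + 1) * c := by
    have h1 := Nat.div_add_mod t c
    have h2 := Nat.mod_lt t hc1
    have e : (t / c + 1) * c = c * (t / c) + c := by ring
    omega
  have hKwit : 1 ≤ (t / c + 1) * c ∧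
      pvOrb n (2 * ((t / c + 1) * c)) = pvOrb n ((t / c + 1) * c) := by
    constructor
    · have : 0 < (t / c + 1) * c := Nat.mul_pos (Nat.succ_pos _) hc1
      omega
    · have := pvPmul n t c hper (t / c + 1) ((t / c + 1) * c) hk0t
      rw [two_mul]
      exact this
  have hKex : ∃ k, 1 ≤ k ∧ pvOrb n (2 * k) = pvOrb n k := ⟨_, hKwit⟩
  have hKspec := Nat.find_spec hKex
  set K := Nat.find hKex with hK
  obtain ⟨hK1, hKrep⟩ := hKspec
  have hKmin : ∀ k, 1 ≤ k → pvOrb n (2 * k) = pvOrb n k → K ≤ k :=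
    fun k h1 h2 => Nat.find_min' hKex ⟨h1, h2⟩
  have hKb : K ≤ t + c := by
    have h1 : K ≤ (t / c + 1) * c := Nat.find_min' hKex hKwit
    have h2 : (t / c) * c ≤ t := Nat.div_mul_le_self t c
    have e : (t / c + 1) * c = (t / c) * c + c := by ring
    omega
  clear_value t c K
  have htK : t ≤ K := by
    have h2K := hKrep
    rw [two_mul] at h2K
    exact hmin K K hK1 h2K
  have hmeet := pvMeet n K hKrep hKmin (n.natAbs + 2) 1 le_rfl hK1 (by omega)
  have hmeet' : floydMeetGo n (pvOrb n 1) (pvOrb n 2) (n.natAbs + 2) = pvOrb n K := by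
    simpa using hmeet
  have etort : PySem.Int.mod (1 * 10) n = pvOrb n 1 := rfl
  have ehare : PySem.Int.mod (pvOrb n 1 * 10) n = pvOrb n 2 := rfl
  by_cases hz : ∃ z, pvOrb n z = 0
  · obtain ⟨z, hz0⟩ := hz
    have hzt : pvOrb n t = 0 := by
      have h1 := pvPmul n t c hper z t le_rfl
      have hle : z ≤ t + z * c := by
        have := Nat.le_mul_of_pos_right z hc1
        omega
      have h2 : pvOrb n (t + z * c) = 0 := pvZeroGe n z hz0 _ hle
      exact h1.symm.trans h2
    have hmin0 : ∀ i, i < t → pvOrb n i ≠ 0 := by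
      intro i hi h0
      have hr : pvOrb n (i + 1) = pvOrb n i := by rw [pvZeroStep n i h0, h0]
      have := hmin i 1 le_rfl hr
      omega
    have hKz : pvOrb n K = 0 := pvZeroGe n t hzt K htK
    have hA : trouver_cycle n = 0 := by
      have h := pvAloopZ n t hzt hmin0 (fun i j hij hj => hdist i j hij (by omega))
        (n.natAbs + 2) 0 PySem.Dict.empty (by omega) (by omega)
        (fun x p hx => absurd hx (by simp [PySem.Dict.get?_empty]))
      rw [trouver_cycle]
      simpa [pvOrb] using h
    have hB : trouver_cycle_alt n = 0 := by
      rw [trouver_cycle_alt]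
      simp only [etort, ehare, hmeet', hKz]
      simp
    rw [hA, hB]
  · have hnz : ∀ i, pvOrb n i ≠ 0 := fun i h => hz ⟨i, h⟩
    have hA : trouver_cycle n = (c : Int) := by
      have h := pvAloopNZ n t c hc1 hrepc hdist hnz
        (n.natAbs + 2) 0 PySem.Dict.empty (by omega) (by omega)
        (fun i hi => absurd hi (by omega))
        (fun x p hx => absurd hx (by simp [PySem.Dict.get?_empty]))
      rw [trouver_cycle]
      simpa [pvOrb] using h
    have hB : trouver_cycle_alt n = (c : Int) := by
      have hlam := pvLam n c K hc1 (hper K htK)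
        (fun p hp hr => pvBack n t c hc1 hper hcmin K p htK hp hr)
        (n.natAbs + 2) 1 le_rfl hc1 (by omega)
      have elam : PySem.Int.mod (pvOrb n K * 10) n = pvOrb n (K + 1) := rfl
      rw [trouver_cycle_alt]
      simp only [etort, ehare, hmeet', if_neg (hnz K), elam]
      simpa using hlam
    rw [hA, hB]

-- ===== VERDICT (by name: the statement is the Claim_ definition above) =====
theorem trouver_cycle_spec : Claim_equal_trouver_cycle := by
  intro n _ hpre
  unfold Spec_trouver_cycle
  exact pvMain n hpre
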